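-- pv_equiv track=rewrite | github.com/lucas-swan/FindingConsecutiveIPAddressSegments | find_max_continuous_unused_ips.py | find_continuous_ips
-- ===== SOURCE A (Python) =====
-- def find_continuous_ips(ips, not_allowed_ips):
--     continuous_ips = []
--     temp_ips = []
--
--     for ip in ips:
--         if ip not in not_allowed_ips:
--             temp_ips.append(ip)
--         else:
--             if temp_ips:
--                 continuous_ips.append(temp_ips)
--                 temp_ips = []
--
--     if temp_ips:
--         continuous_ips.append(temp_ips)
--
--     return continuous_ips
-- ===== SOURCE B (Python) =====
-- def find_continuous_ips(ips, not_allowed_ips):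
--     blocked = set(not_allowed_ips)
--     cuts = [i for i, ip in enumerate(ips) if ip in blocked]
--     bounds = [-1] + cuts + [len(ips)]
--     return [ips[l + 1:r] for l, r in zip(bounds, bounds[1:]) if r - l > 1]
-- ===== Notes on version B (the rewrite author's own statement) =====
-- stated objective: faster
-- what changed: Replaces A's one-pass run accumulator (temp buffer, else-branch, post-loop flush) by a staged index computation: first collect the positions of blocked IPs, then slice the list between consecutive cut positions, keeping the non-empty slices.
import Mathlib
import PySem

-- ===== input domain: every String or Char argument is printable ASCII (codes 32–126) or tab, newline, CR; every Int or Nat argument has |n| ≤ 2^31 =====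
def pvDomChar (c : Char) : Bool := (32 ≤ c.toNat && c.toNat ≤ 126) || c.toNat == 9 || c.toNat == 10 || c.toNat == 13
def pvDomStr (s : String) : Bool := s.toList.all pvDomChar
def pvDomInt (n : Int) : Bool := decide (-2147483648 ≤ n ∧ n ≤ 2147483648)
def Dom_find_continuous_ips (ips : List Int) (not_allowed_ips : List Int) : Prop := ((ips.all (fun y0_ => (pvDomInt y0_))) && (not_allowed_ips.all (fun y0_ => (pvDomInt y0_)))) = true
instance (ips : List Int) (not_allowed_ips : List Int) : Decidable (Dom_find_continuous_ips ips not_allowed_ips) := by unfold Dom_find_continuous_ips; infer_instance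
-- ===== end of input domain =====

-- B replaces A's one-pass run accumulator by a staged computation — collect the blocked
-- positions into a set, then slice the list between consecutive cut positions (measured faster).

-- ===== PORT A =====
-- one loop step: `if ip not in not_allowed_ips: temp.append(ip) else: if temp: flush`
def pvAStep (not_allowed_ips : List Int) (st : List (List Int) × List Int) (ip : Int) :
    List (List Int) × List Int :=
  if ip ∉ not_allowed_ips then (st.1, st.2 ++ [ip])
  else if st.2 ≠ [] then (st.1 ++ [st.2], []) else st

def find_continuous_ips (ips : List Int) (not_allowed_ips : List Int) : List (List Int) :=
  let st := ips.foldl (pvAStep not_allowed_ips) ([], [])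
  if st.2 ≠ [] then st.1 ++ [st.2] else st.1

-- ===== PORT B =====
-- cuts = [i for i, ip in enumerate(ips) if ip in blocked]; bounds = [-1] + cuts + [len(ips)];
-- [ips[l+1:r] for l, r in zip(bounds, bounds[1:]) if r - l > 1]
def find_continuous_ips_alt (ips : List Int) (not_allowed_ips : List Int) : List (List Int) :=
  let blocked : PySem.Set Int := PySem.Set.ofList not_allowed_ips
  let cuts : List Int :=
    ((PySem.List.enumerate ips 0).filter (fun p => decide (p.2 ∈ blocked))).map (fun p => p.1)
  let bounds : List Int := [(-1 : Int)] ++ cuts ++ [(ips.length : Int)]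
  ((bounds.zip (PySem.List.slice bounds (some 1) none)).filter
      (fun p => decide (p.2 - p.1 > 1))).map
    (fun p => PySem.List.slice ips (some (p.1 + 1)) (some p.2))

-- ===== PRECONDITION & SPEC =====
def Spec_find_continuous_ips (ips : List Int) (not_allowed_ips : List Int) (out : List (List Int)) : Prop := out = find_continuous_ips_alt ips not_allowed_ips
instance (ips : List Int) (not_allowed_ips : List Int) (out : List (List Int)) : Decidable (Spec_find_continuous_ips ips not_allowed_ips out) := by unfold Spec_find_continuous_ips; infer_instance

-- ===== CLAIM (what is proved, stated in full; the proofs are below) =====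
def Claim_equal_find_continuous_ips : Prop := ∀ (ips : List Int) (not_allowed_ips : List Int), Dom_find_continuous_ips ips not_allowed_ips → Spec_find_continuous_ips ips not_allowed_ips (find_continuous_ips ips not_allowed_ips)

-- ===== LEMMAS AND PROOFS =====

-- canonical maximal-run decomposition both programs are proved equal to
def pvRuns (na : List Int) : List Int → List (List Int)
  | [] => []
  | x :: xs =>
      if x ∈ na then pvRuns na xs
      else (x :: xs.takeWhile (fun y => decide (y ∉ na))) ::
             pvRuns na (xs.dropWhile (fun y => decide (y ∉ na)))
termination_by xs => xs.length
decreasing_by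
  · simp
  · simpa using Nat.lt_succ_of_le (List.length_dropWhile_le _ _)

-- ---------- A-side ----------

-- A's loop body, finished by the post-loop flush, as a function of the pending temp buffer
def pvFA (na : List Int) (xs : List Int) (t : List Int) : List (List Int) :=
  let st := xs.foldl (pvAStep na) ([], t)
  if st.2 ≠ [] then st.1 ++ [st.2] else st.1

-- the accumulator of A's fold only ever grows by appending
theorem pvFoldA_acc (na : List Int) (xs : List Int) :
    ∀ c t, xs.foldl (pvAStep na) (c, t)
      = (c ++ (xs.foldl (pvAStep na) ([], t)).1, (xs.foldl (pvAStep na) ([], t)).2) := by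
  induction xs with
  | nil => simp
  | cons x xs ih =>
      intro c t
      rw [List.foldl_cons, List.foldl_cons]
      rcases hp : pvAStep na ([], t) x with ⟨p1, p2⟩
      have hstep : pvAStep na (c, t) x = (c ++ p1, p2) := by
        unfold pvAStep at hp ⊢
        by_cases hx : x ∈ na
        · by_cases ht : t = [] <;> simp [hx, ht] at hp ⊢ <;> simp [hp.1, hp.2]
        · simp [hx] at hp ⊢; simp [hp.1, hp.2]
      rw [hstep, ih (c ++ p1) p2, ih p1 p2]
      simp

theorem pvFA_nil (na t : List Int) : pvFA na [] t = if t ≠ [] then [t] else [] := rfl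

theorem pvFA_cons_allowed (na : List Int) (x : Int) (xs t : List Int) (hx : x ∉ na) :
    pvFA na (x :: xs) t = pvFA na xs (t ++ [x]) := by
  unfold pvFA
  rw [List.foldl_cons, show pvAStep na ([], t) x = ([], t ++ [x]) from by
    unfold pvAStep; simp [hx]]

theorem pvFA_cons_blocked_nil (na : List Int) (x : Int) (xs : List Int) (hx : x ∈ na) :
    pvFA na (x :: xs) [] = pvFA na xs [] := by
  unfold pvFA
  rw [List.foldl_cons, show pvAStep na ([], ([] : List Int)) x = ([], []) from by
    unfold pvAStep; simp [hx]]

theorem pvFA_cons_blocked (na : List Int) (x : Int) (xs t : List Int) (hx : x ∈ na)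
    (ht : t ≠ []) : pvFA na (x :: xs) t = t :: pvFA na xs [] := by
  unfold pvFA
  rw [List.foldl_cons, show pvAStep na ([], t) x = ([t], []) from by
    unfold pvAStep; simp [hx, ht]]
  rw [pvFoldA_acc na xs [t] []]
  by_cases h2 : (xs.foldl (pvAStep na) ([], [])).2 = [] <;> simp [h2]

-- absorbing a run of allowed elements into the pending buffer
theorem pvFA_run (na : List Int) (run : List Int) (hrun : ∀ x ∈ run, x ∉ na) :
    ∀ rest t, pvFA na (run ++ rest) t = pvFA na rest (t ++ run) := by
  induction run with
  | nil => simp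
  | cons x run ih =>
      intro rest t
      rw [List.cons_append, pvFA_cons_allowed na x _ t (hrun x (by simp))]
      rw [ih (fun y hy => hrun y (by simp [hy])) rest]
      simp

theorem pvDropWhile_head (p : Int → Bool) (l : List Int) :
    ∀ y ys, l.dropWhile p = y :: ys → p y = false := by
  induction l with
  | nil => simp
  | cons a l ih =>
      intro y ys h
      by_cases hp : p a
      · rw [List.dropWhile_cons_of_pos hp] at h; exact ih y ys h
      · rw [List.dropWhile_cons_of_neg hp] at h
        cases h; simpa using hp

-- A's loop with empty buffer computes the canonical run decomposition
theorem pvA_eq_runs (na : List Int) : ∀ n (xs : List Int), xs.length ≤ n →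
    pvFA na xs [] = pvRuns na xs := by
  intro n
  induction n with
  | zero =>
      intro xs hxs
      have hx : xs = [] := List.length_eq_zero_iff.mp (Nat.le_zero.mp hxs)
      subst hx
      rw [pvRuns]; rfl
  | succ n ih =>
      intro xs hxs
      match xs with
      | [] => rw [pvRuns]; rfl
      | x :: rest =>
        have hrest : rest.length ≤ n := Nat.lt_succ_iff.mp (by simpa using hxs)
        rw [pvRuns]
        by_cases hx : x ∈ na
        · rw [if_pos hx, pvFA_cons_blocked_nil na x rest hx, ih rest hrest]
        · rw [if_neg hx]
          have hsplit : (rest.takeWhile (fun y => decide (y ∉ na)))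
              ++ rest.dropWhile (fun y => decide (y ∉ na)) = rest :=
            List.takeWhile_append_dropWhile
          have htwall : ∀ y ∈ rest.takeWhile (fun y => decide (y ∉ na)), y ∉ na := by
            intro y hy; simpa using List.mem_takeWhile_imp hy
          have lhs1 : pvFA na (x :: rest) []
              = pvFA na (rest.dropWhile (fun y => decide (y ∉ na)))
                  (x :: rest.takeWhile (fun y => decide (y ∉ na))) := by
            conv_lhs => rw [show x :: rest
              = (x :: rest.takeWhile (fun y => decide (y ∉ na)))
                  ++ rest.dropWhile (fun y => decide (y ∉ na)) from by
                rw [List.cons_append, hsplit]]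
            rw [pvFA_run na _ (by
              intro y hy
              rcases List.mem_cons.mp hy with h | h
              · exact h ▸ hx
              · exact htwall y h) _ []]
            simp
          rw [lhs1]
          rcases hdw : rest.dropWhile (fun y => decide (y ∉ na)) with _ | ⟨y, dw'⟩
          · rw [pvFA_nil, pvRuns]
            simp
          · have hy : y ∈ na := by simpa using pvDropWhile_head _ rest y dw' hdw
            have hlen : dw'.length ≤ n := by
              have h1 : (y :: dw').length ≤ rest.length := by
                rw [← hdw]; exact List.length_dropWhile_le _ _
              simp at h1; omega
            rw [pvFA_cons_blocked na y dw' _ hy (by simp), ih dw' hlen, pvRuns, if_pos hy]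

-- ---------- B-side ----------

def pvCuts (na : List Int) (xs : List Int) : List Int :=
  ((PySem.List.enumerate xs 0).filter (fun p => decide (p.2 ∈ na))).map (fun p => p.1)

def pvAdj : List Int → List (Int × Int)
  | a :: b :: t => (a, b) :: pvAdj (b :: t)
  | _ => []

def pvProc (xs : List Int) (pairs : List (Int × Int)) : List (List Int) :=
  (pairs.filter (fun p => decide (p.2 - p.1 > 1))).map
    (fun p => PySem.List.slice xs (some (p.1 + 1)) (some p.2))

theorem pvZipTail (l : List Int) : l.zip l.tail = pvAdj l := by
  induction l with
  | nil => rfl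
  | cons a l ih =>
      cases l with
      | nil => rfl
      | cons b t =>
          show (a, b) :: (b :: t).zip t = pvAdj (a :: b :: t)
          have : (b :: t).zip t = (b :: t).zip (b :: t).tail := rfl
          rw [this, ih]
          rfl

theorem pvAdj_map (f : Int → Int) (l : List Int) :
    pvAdj (l.map f) = (pvAdj l).map (fun p => (f p.1, f p.2)) := by
  induction l with
  | nil => rfl
  | cons a l ih =>
      cases l with
      | nil => rfl
      | cons b t =>
          show (f a, f b) :: pvAdj ((b :: t).map f)
            = (f a, f b) :: (pvAdj (b :: t)).map (fun p => (f p.1, f p.2))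
          rw [ih]

theorem pvAdj_mem_fst (l : List Int) (p : Int × Int) (h : p ∈ pvAdj l) : p.1 ∈ l := by
  induction l with
  | nil => simp [pvAdj] at h
  | cons a l ih =>
      cases l with
      | nil => simp [pvAdj] at h
      | cons b t =>
          rcases List.mem_cons.mp h with h1 | h1
          · subst h1; simp
          · exact List.mem_cons_of_mem a (ih h1)

theorem pvAdj_mem_snd (a : Int) (t : List Int) (p : Int × Int)
    (h : p ∈ pvAdj (a :: t)) : p.2 ∈ t := by
  induction t generalizing a with
  | nil => simp [pvAdj] at h
  | cons b t ih =>
      rcases List.mem_cons.mp h with h1 | h1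
      · subst h1; simp
      · exact List.mem_cons_of_mem b (ih b h1)

theorem pvEnumShift (xs : List Int) : ∀ s, PySem.List.enumerate xs (s + 1)
    = (PySem.List.enumerate xs s).map (fun p => (p.1 + 1, p.2)) := by
  induction xs with
  | nil => intro s; simp [PySem.List.enumerate_nil]
  | cons x xs ih =>
      intro s
      rw [PySem.List.enumerate_cons, PySem.List.enumerate_cons, List.map_cons, ih (s + 1)]

theorem pvCuts_cons (na : List Int) (x : Int) (xs : List Int) :
    pvCuts na (x :: xs)
      = (if x ∈ na then [(0 : Int)] else []) ++ (pvCuts na xs).map (· + 1) := by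
  unfold pvCuts
  rw [PySem.List.enumerate_cons, show (0 : Int) + 1 = 0 + 1 from rfl, pvEnumShift xs 0,
      List.filter_cons, List.filter_map]
  have hc : ((fun p : Int × Int => decide (p.2 ∈ na)) ∘ fun p : Int × Int => (p.1 + 1, p.2))
      = fun p : Int × Int => decide (p.2 ∈ na) := by
    funext q; rfl
  rw [hc]
  by_cases hx : x ∈ na <;> simp [hx, List.map_map, Function.comp]

theorem pvCuts_nonneg (na : List Int) (xs : List Int) (c : Int) (h : c ∈ pvCuts na xs) :
    0 ≤ c := by
  induction xs generalizing c with
  | nil => simp [pvCuts, PySem.List.enumerate_nil] at h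
  | cons x xs ih =>
      rw [pvCuts_cons] at h
      rcases List.mem_append.mp h with h1 | h1
      · split at h1 <;> simp at h1; omega
      · obtain ⟨d, hd, rfl⟩ := List.mem_map.mp h1
        have := ih d hd
        omega

theorem pvCuts_append_allowed (na : List Int) (pre : List Int)
    (h : ∀ y ∈ pre, y ∉ na) : ∀ xs, pvCuts na (pre ++ xs)
      = (pvCuts na xs).map (· + (pre.length : Int)) := by
  induction pre with
  | nil => intro xs; simp
  | cons z pre ih =>
      intro xs
      rw [List.cons_append, pvCuts_cons, if_neg (h z (by simp)), List.nil_append,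
          ih (fun y hy => h y (by simp [hy])) xs, List.map_map]
      apply List.map_congr_left
      intro c _
      simp [Function.comp]
      ring

theorem pvSliceShift (pre xs : List Int) (a b : Int) (ha : 0 ≤ a) (hb : 0 ≤ b) :
    PySem.List.slice (pre ++ xs) (some (a + (pre.length : Int))) (some (b + (pre.length : Int)))
      = PySem.List.slice xs (some a) (some b) := by
  rw [PySem.List.slice_toNat _ (by omega) (by omega), PySem.List.slice_toNat _ ha hb]
  have h1 : (a + (pre.length : Int)).toNat = pre.length + a.toNat := by omega
  have h2 : (b + (pre.length : Int)).toNat - (pre.length + a.toNat)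
      = b.toNat - a.toNat := by omega
  rw [h1, h2, List.drop_append, List.drop_eq_nil_of_le (by omega), Nat.add_sub_cancel_left,
      List.nil_append]

theorem pvCuts_nil (na : List Int) : pvCuts na [] = [] := rfl

theorem pvAdj_cons_cons (a b : Int) (t : List Int) :
    pvAdj (a :: b :: t) = (a, b) :: pvAdj (b :: t) := rfl

theorem pvProc_skip (xs : List Int) (a b : Int) (P : List (Int × Int)) (h : ¬ b - a > 1) :
    pvProc xs ((a, b) :: P) = pvProc xs P := by
  simp [pvProc, h]

theorem pvProc_keep (xs : List Int) (a b : Int) (P : List (Int × Int)) (h : b - a > 1) :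
    pvProc xs ((a, b) :: P)
      = PySem.List.slice xs (some (a + 1)) (some b) :: pvProc xs P := by
  simp [pvProc, h]

-- dropping a common index shift of all cut pairs is dropping a prefix of the sliced list
theorem pvProc_shift (pre xs : List Int) (k : Int) (hk : (pre.length : Int) = k)
    (P : List (Int × Int)) (h : ∀ p ∈ P, -1 ≤ p.1 ∧ 0 ≤ p.2) :
    pvProc (pre ++ xs) (P.map (fun p => (p.1 + k, p.2 + k))) = pvProc xs P := by
  subst hk
  unfold pvProc
  rw [List.filter_map]
  have hcond : ((fun p : Int × Int => decide (p.2 - p.1 > 1))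
      ∘ fun p : Int × Int => (p.1 + (pre.length : Int), p.2 + (pre.length : Int)))
      = fun p : Int × Int => decide (p.2 - p.1 > 1) := by
    funext q
    simp only [Function.comp]
    exact decide_eq_decide.mpr (by constructor <;> intro <;> omega)
  rw [hcond, List.map_map]
  apply List.map_congr_left
  intro p hp
  obtain ⟨h1, h2⟩ := h p (List.mem_of_mem_filter hp)
  simp only [Function.comp]
  rw [show p.1 + (pre.length : Int) + 1 = p.1 + 1 + (pre.length : Int) from by ring]
  exact pvSliceShift pre xs (p.1 + 1) p.2 (by omega) h2

theorem pvT_nonneg (na r : List Int) (c : Int)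
    (h : c ∈ pvCuts na r ++ [((r.length : Nat) : Int)]) : 0 ≤ c := by
  rcases List.mem_append.mp h with h | h
  · exact pvCuts_nonneg na r c h
  · simp only [List.mem_singleton] at h
    subst h
    exact Int.natCast_nonneg _

-- a blocked head contributes cut 0, which B's pair filter drops
theorem pvB_skip (na : List Int) (x : Int) (rest : List Int) (hx : x ∈ na) :
    pvProc (x :: rest) (pvAdj ((-1) :: (pvCuts na (x :: rest) ++ [((x :: rest).length : Int)])))
      = pvProc rest (pvAdj ((-1) :: (pvCuts na rest ++ [(rest.length : Int)]))) := by
  rw [pvCuts_cons, if_pos hx]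
  have hlist : (-1 : Int) :: (([0] ++ (pvCuts na rest).map (· + 1)) ++ [((x :: rest).length : Int)])
      = -1 :: (((-1) :: (pvCuts na rest ++ [(rest.length : Int)])).map (· + 1)) := by
    simp [List.map_append]
  have hcons : ((-1 : Int) + 1) :: (pvCuts na rest ++ [(rest.length : Int)]).map (· + 1)
      = ((-1 : Int) :: (pvCuts na rest ++ [(rest.length : Int)])).map (· + 1) := by simp
  rw [hlist, List.map_cons, pvAdj_cons_cons, pvProc_skip _ _ _ _ (by norm_num),
      hcons, pvAdj_map, show x :: rest = [x] ++ rest from rfl,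
      pvProc_shift [x] rest 1 (by simp)]
  intro p hp
  constructor
  · rcases List.mem_cons.mp (pvAdj_mem_fst _ p hp) with h | h
    · omega
    · have := pvT_nonneg na rest p.1 h
      omega
  · exact pvT_nonneg na rest p.2 (pvAdj_mem_snd _ _ p hp)

-- a maximal allowed run is B's first kept pair, and the remaining pairs shift down by its length
theorem pvB_step (na run r : List Int) (hrun : run ≠ []) (hallowed : ∀ y ∈ run, y ∉ na)
    (hhead : r = [] ∨ ∃ y r', r = y :: r' ∧ y ∈ na) :
    pvProc (run ++ r) (pvAdj ((-1) :: (pvCuts na (run ++ r) ++ [((run ++ r).length : Int)])))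
      = run :: pvProc r (pvAdj ((-1) :: (pvCuts na r ++ [(r.length : Int)]))) := by
  rw [pvCuts_append_allowed na run hallowed r]
  have hL : (((run ++ r).length : Nat) : Int) = ((r.length : Nat) : Int) + (run.length : Int) := by
    push_cast [List.length_append]
    ring
  rw [hL]
  have hlist : (-1 : Int) :: ((pvCuts na r).map (· + (run.length : Int))
        ++ [((r.length : Nat) : Int) + (run.length : Int)])
      = -1 :: ((pvCuts na r ++ [((r.length : Nat) : Int)]).map (· + (run.length : Int))) := by
    simp [List.map_append]
  rw [hlist]
  obtain ⟨T₂, hT⟩ : ∃ T₂, pvCuts na r ++ [((r.length : Nat) : Int)] = 0 :: T₂ := by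
    rcases hhead with rfl | ⟨y, r', rfl, hy⟩
    · exact ⟨[], by simp [pvCuts_nil]⟩
    · exact ⟨(pvCuts na r').map (· + 1) ++ [((y :: r').length : Int)],
          by rw [pvCuts_cons, if_pos hy]; simp⟩
  have hbounds : ∀ p ∈ pvAdj ((0 : Int) :: T₂), -1 ≤ p.1 ∧ 0 ≤ p.2 := by
    intro p hp
    constructor
    · have h := pvAdj_mem_fst _ p hp
      rw [← hT] at h
      have := pvT_nonneg na r p.1 h
      omega
    · have h := pvAdj_mem_snd _ _ p hp
      have h2 : p.2 ∈ (0 : Int) :: T₂ := List.mem_cons_of_mem _ h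
      rw [← hT] at h2
      exact pvT_nonneg na r p.2 h2
  have hk : 0 < run.length := List.length_pos_of_ne_nil hrun
  have hcons : ((0 : Int) + (run.length : Int)) :: T₂.map (· + (run.length : Int))
      = ((0 : Int) :: T₂).map (· + (run.length : Int)) := by simp
  rw [hT, List.map_cons, pvAdj_cons_cons,
      pvProc_keep _ _ _ _ (by omega), hcons, pvAdj_map,
      pvProc_shift run r (run.length : Int) rfl _ hbounds]
  congr 1
  rw [show (-1 : Int) + 1 = 0 from by norm_num, zero_add,
      PySem.List.slice_zero_start, PySem.List.slice_to_natCast, List.take_left]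

-- B's staged computation also computes the canonical run decomposition
theorem pvB_eq_runs (na : List Int) : ∀ n (xs : List Int), xs.length ≤ n →
    pvProc xs (pvAdj ((-1) :: (pvCuts na xs ++ [(xs.length : Int)]))) = pvRuns na xs := by
  intro n
  induction n with
  | zero =>
      intro xs hxs
      have hx : xs = [] := List.length_eq_zero_iff.mp (Nat.le_zero.mp hxs)
      subst hx
      rw [pvRuns, pvCuts_nil, List.nil_append, pvAdj_cons_cons,
            pvProc_skip _ _ _ _ (by simp)]
      rfl
  | succ n ih =>
      intro xs hxs
      match xs with
      | [] =>
          rw [pvRuns, pvCuts_nil, List.nil_append, pvAdj_cons_cons,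
              pvProc_skip _ _ _ _ (by simp)]
          rfl
      | x :: rest =>
        have hrest : rest.length ≤ n := Nat.lt_succ_iff.mp (by simpa using hxs)
        by_cases hx : x ∈ na
        · rw [pvB_skip na x rest hx, ih rest hrest, pvRuns, if_pos hx]
        · rw [pvRuns, if_neg hx]
          have hxsplit : x :: rest
              = (x :: rest.takeWhile (fun y => decide (y ∉ na)))
                  ++ rest.dropWhile (fun y => decide (y ∉ na)) := by
            rw [List.cons_append, List.takeWhile_append_dropWhile]
          have htwall : ∀ y ∈ x :: rest.takeWhile (fun y => decide (y ∉ na)), y ∉ na := by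
            intro y hy
            rcases List.mem_cons.mp hy with h | h
            · exact h ▸ hx
            · simpa using List.mem_takeWhile_imp h
          have hhead : rest.dropWhile (fun y => decide (y ∉ na)) = []
              ∨ ∃ y r', rest.dropWhile (fun y => decide (y ∉ na)) = y :: r' ∧ y ∈ na := by
            rcases hdw : rest.dropWhile (fun y => decide (y ∉ na)) with _ | ⟨y, r'⟩
            · exact Or.inl rfl
            · exact Or.inr ⟨y, r', rfl, by simpa using pvDropWhile_head _ rest y r' hdw⟩
          conv_lhs => rw [hxsplit]
          rw [pvB_step na _ _ (by simp) htwall hhead]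
          congr 1
          exact ih _ (le_trans (List.length_dropWhile_le _ _) hrest)

theorem pvAlt_eq (ips na : List Int) :
    find_continuous_ips_alt ips na
      = pvProc ips (pvAdj ((-1) :: (pvCuts na ips ++ [(ips.length : Int)]))) := by
  have hpred : (fun p : Int × Int => decide (p.2 ∈ PySem.Set.ofList na))
      = fun p : Int × Int => decide (p.2 ∈ na) := by
    funext q
    simp [PySem.Set.mem_ofList]
  unfold find_continuous_ips_alt pvProc pvCuts
  simp only [PySem.List.slice_from_one, List.cons_append, List.nil_append, List.tail_cons,
    hpred]
  rw [← pvZipTail]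
  rfl

-- ===== VERDICT (by name: the statement is the Claim_ definition above) =====
theorem find_continuous_ips_spec : Claim_equal_find_continuous_ips := by
  intro ips na _
  unfold Spec_find_continuous_ips
  have ha : find_continuous_ips ips na = pvFA na ips [] := rfl
  rw [ha, pvAlt_eq, pvA_eq_runs na ips.length ips le_rfl,
      pvB_eq_runs na ips.length ips le_rfl]
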